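-- pv_equiv track=rewrite | github.com/anthony-walker/pysweep | pysweep/sweep/ncore/block.py | create_down_sets
-- ===== SOURCE A (Python) =====
-- def create_down_sets(block_size,ops):
--     """Use this function to create the down pyramid sets from up sets."""
--     bsx = int(block_size[0]/2)
--     bsy = int(block_size[1]/2)
--     #Limits
--     lx =int((bsx)-ops); #lower x
--     ly = int((bsy)-ops); #lower y
--     ux = int((bsx)+ops); #upper x
--     uy = int((bsy)+ops); #upper y
--     #Creating points
--     iidx = tuple()
--     sets = tuple()
--     fset = tuple()
--     for i in range(ops,block_size[0]+ops):
--         temp = tuple()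
--         for j in range(ops,block_size[1]+ops):
--             temp += (i,j),
--             fset += (i,j),
--         iidx += temp,
--     #Creating sets
--     while(ux < block_size[0] and uy < block_size[1]):
--         new_set = tuple()
--         for row in iidx[lx:ux]:
--             for item in row[ly:uy]:
--                 new_set+=item,
--         sets+= new_set,
--         lx-=ops
--         ly-=ops
--         ux+=ops
--         uy+=ops
--     #Adding final set
--     sets += fset,
--     return sets
-- ===== SOURCE B (Python) =====
-- def create_down_sets(block_size, ops):
--     """Use this function to create the down pyramid sets from up sets."""
--     bsx = int(block_size[0]/2)
--     bsy = int(block_size[1]/2)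
--     lx = bsx - ops; ly = bsy - ops
--     ux = bsx + ops; uy = bsy + ops
--     sets = tuple()
--     while ux < block_size[0] and uy < block_size[1]:
--         new_set = tuple((i, j)
--                         for i in range(ops + lx, ops + ux)
--                         for j in range(ops + ly, ops + uy))
--         sets += new_set,
--         lx -= ops; ly -= ops
--         ux += ops; uy += ops
--     fset = tuple((i, j)
--                  for i in range(ops, block_size[0] + ops)
--                  for j in range(ops, block_size[1] + ops))
--     return sets + (fset,)
-- ===== Notes on version B (the rewrite author's own statement) =====
-- stated objective: faster
-- what changed: B drops A's intermediate iidx point-grid entirely: each concentric level's point set is generated directly from coordinate ranges with one tuple(generator) (and the final flat set from one product of ranges), instead of building a grid of points by repeated tuple += concatenation and slicing it per level.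
import Mathlib
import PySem

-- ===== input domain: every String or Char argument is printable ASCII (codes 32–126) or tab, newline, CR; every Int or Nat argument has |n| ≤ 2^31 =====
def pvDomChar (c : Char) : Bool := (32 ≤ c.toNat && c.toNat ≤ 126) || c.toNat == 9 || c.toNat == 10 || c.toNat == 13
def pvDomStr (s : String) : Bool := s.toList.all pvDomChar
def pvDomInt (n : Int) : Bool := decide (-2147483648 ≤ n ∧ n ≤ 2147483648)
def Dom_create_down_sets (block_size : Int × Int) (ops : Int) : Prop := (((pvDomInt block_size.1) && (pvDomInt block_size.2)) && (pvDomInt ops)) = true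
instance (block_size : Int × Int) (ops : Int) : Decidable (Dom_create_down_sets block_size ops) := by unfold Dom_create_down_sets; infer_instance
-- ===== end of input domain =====

-- B drops A's intermediate iidx grid: each level's points come directly from coordinate ranges
-- built in one pass each, instead of slicing a grid accumulated by repeated tuple concatenation
-- (measured faster in a timing run).

-- ===== PORT A =====
-- the two nested for-loops building iidx (grid of rows of points) and fset (flat list), in one pass
def cdsBuild (block_size : Int × Int) (ops : Int) : List (List (Int × Int)) × List (Int × Int) :=
  (PySem.List.pyRange ops (block_size.1 + ops) 1).foldl
    (fun st i =>
      let inner := (PySem.List.pyRange ops (block_size.2 + ops) 1).foldl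
        (fun (st2 : List (Int × Int) × List (Int × Int)) j => (st2.1 ++ [(i, j)], st2.2 ++ [(i, j)]))
        ([], st.2)
      (st.1 ++ [inner.1], inner.2))
    ([], [])

-- A's while loop; the Nat fuel is a totality guard only (Pre_ rules out the diverging inputs,
-- and on terminating inputs the fuel passed by create_down_sets exceeds the iteration count)
def cdsLoopA (bs0 bs1 ops : Int) (iidx : List (List (Int × Int))) :
    Nat → Int → Int → Int → Int → List (List (Int × Int)) → List (List (Int × Int))
  | 0, _, _, _, _, sets => sets
  | fuel+1, lx, ly, ux, uy, sets =>
    if ux < bs0 ∧ uy < bs1 then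
      cdsLoopA bs0 bs1 ops iidx fuel (lx - ops) (ly - ops) (ux + ops) (uy + ops)
        (sets ++ [(PySem.List.slice iidx (some lx) (some ux)).foldl
          (fun acc row => acc ++ PySem.List.slice row (some ly) (some uy)) []])
    else sets

-- int(block_size[0]/2) is exact float halving then truncation = truncating division on |n| ≤ 2^31
def create_down_sets (block_size : Int × Int) (ops : Int) : List (List (Int × Int)) :=
  let bsx := PySem.Int.truncdiv block_size.1 2
  let bsy := PySem.Int.truncdiv block_size.2 2
  let bf := cdsBuild block_size ops
  let sets := cdsLoopA block_size.1 block_size.2 ops bf.1 (block_size.1.toNat + 1)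
    (bsx - ops) (bsy - ops) (bsx + ops) (bsy + ops) []
  sets ++ [bf.2]

-- ===== PORT B =====
-- B's while loop: the level's point set is generated directly from the coordinate ranges
def cdsLoopB (bs0 bs1 ops : Int) :
    Nat → Int → Int → Int → Int → List (List (Int × Int)) → List (List (Int × Int))
  | 0, _, _, _, _, sets => sets
  | fuel+1, lx, ly, ux, uy, sets =>
    if ux < bs0 ∧ uy < bs1 then
      cdsLoopB bs0 bs1 ops fuel (lx - ops) (ly - ops) (ux + ops) (uy + ops)
        (sets ++ [(PySem.List.pyRange (ops + lx) (ops + ux) 1).flatMap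
          (fun i => (PySem.List.pyRange (ops + ly) (ops + uy) 1).map (fun j => (i, j)))])
    else sets

def create_down_sets_alt (block_size : Int × Int) (ops : Int) : List (List (Int × Int)) :=
  let bsx := PySem.Int.truncdiv block_size.1 2
  let bsy := PySem.Int.truncdiv block_size.2 2
  let sets := cdsLoopB block_size.1 block_size.2 ops (block_size.1.toNat + 1)
    (bsx - ops) (bsy - ops) (bsx + ops) (bsy + ops) []
  let fset := (PySem.List.pyRange ops (block_size.1 + ops) 1).flatMap
    (fun i => (PySem.List.pyRange ops (block_size.2 + ops) 1).map (fun j => (i, j)))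
  sets ++ [fset]

-- ===== PRECONDITION & SPEC =====
-- Pre_ excludes exactly the inputs on which A's while loop never terminates (A returns no value
-- there): ops ≤ 0 while the loop condition initially holds, so ux/uy never reach the bounds.
def Pre_create_down_sets (block_size : Int × Int) (ops : Int) : Prop :=
  0 < ops ∨ ¬(PySem.Int.truncdiv block_size.1 2 + ops < block_size.1 ∧
              PySem.Int.truncdiv block_size.2 2 + ops < block_size.2)
instance (block_size : Int × Int) (ops : Int) : Decidable (Pre_create_down_sets block_size ops) := by unfold Pre_create_down_sets; infer_instance
def pvWitness_create_down_sets : (Int × Int) × Int := ((4, 4), 1)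

def Spec_create_down_sets (block_size : Int × Int) (ops : Int) (out : List (List (Int × Int))) : Prop := out = create_down_sets_alt block_size ops
instance (block_size : Int × Int) (ops : Int) (out : List (List (Int × Int))) : Decidable (Spec_create_down_sets block_size ops out) := by unfold Spec_create_down_sets; infer_instance

-- ===== CLAIM (what is proved, stated in full; the proofs are below) =====
def Claim_equal_create_down_sets : Prop := ∀ (block_size : Int × Int) (ops : Int), Dom_create_down_sets block_size ops → Pre_create_down_sets block_size ops → Spec_create_down_sets block_size ops (create_down_sets block_size ops)

-- ===== LEMMAS AND PROOFS =====

lemma two_truncdiv_two (n : Int) :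
    n - 1 ≤ 2 * PySem.Int.truncdiv n 2 ∧ 2 * PySem.Int.truncdiv n 2 ≤ n + 1 := by
  simp only [PySem.Int.truncdiv]
  by_cases h : 0 ≤ n
  · rw [Int.tdiv_eq_ediv_of_nonneg h]; omega
  · have h1 : (-n).tdiv 2 = -(n.tdiv 2) := by rw [Int.neg_tdiv]
    have h2 : (-n).tdiv 2 = (-n) / 2 := Int.tdiv_eq_ediv_of_nonneg (by omega)
    omega

lemma cdsBuild_inner (i : Int) (R : List Int) (acc : List (Int × Int)) :
    R.foldl (fun (st2 : List (Int × Int) × List (Int × Int)) j => (st2.1 ++ [(i, j)], st2.2 ++ [(i, j)]))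
      ([], acc)
    = (R.map (fun j => (i, j)), acc ++ R.map (fun j => (i, j))) := by
  suffices h : ∀ (a1 a2 : List (Int × Int)),
      R.foldl (fun st2 j => (st2.1 ++ [(i, j)], st2.2 ++ [(i, j)])) (a1, a2)
      = (a1 ++ R.map (fun j => (i, j)), a2 ++ R.map (fun j => (i, j))) by simp [h]
  induction R with
  | nil => simp
  | cons x xs ih => intro a1 a2; simp [List.foldl_cons, ih]

lemma cds_foldl_pair_aux (L : List Int) (g : Int → List (Int × Int)) :
    ∀ (a1 : List (List (Int × Int))) (a2 : List (Int × Int)),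
      L.foldl (fun st i => (st.1 ++ [g i], st.2 ++ g i)) (a1, a2)
      = (a1 ++ L.map g, a2 ++ L.flatMap g) := by
  induction L with
  | nil => simp
  | cons x xs ih => intro a1 a2; simp [List.foldl_cons, ih]

lemma cds_foldl_pair (L : List Int) (g : Int → List (Int × Int)) :
    L.foldl (fun (st : List (List (Int × Int)) × List (Int × Int)) i => (st.1 ++ [g i], st.2 ++ g i)) ([], [])
      = (L.map g, L.flatMap g) := by simp [cds_foldl_pair_aux]

lemma cdsBuild_eq (block_size : Int × Int) (ops : Int) :
    cdsBuild block_size ops =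
      ((PySem.List.pyRange ops (block_size.1 + ops) 1).map
          (fun i => (PySem.List.pyRange ops (block_size.2 + ops) 1).map (fun j => (i, j))),
        (PySem.List.pyRange ops (block_size.1 + ops) 1).flatMap
          (fun i => (PySem.List.pyRange ops (block_size.2 + ops) 1).map (fun j => (i, j)))) := by
  unfold cdsBuild
  generalize PySem.List.pyRange ops (block_size.1 + ops) 1 = L
  generalize PySem.List.pyRange ops (block_size.2 + ops) 1 = R
  have hfun : (fun (st : List (List (Int × Int)) × List (Int × Int)) i =>
      let inner := R.foldl (fun (st2 : List (Int × Int) × List (Int × Int)) j =>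
          (st2.1 ++ [(i, j)], st2.2 ++ [(i, j)])) ([], st.2)
      (st.1 ++ [inner.1], inner.2))
      = (fun st i => (st.1 ++ [R.map (fun j => (i, j))], st.2 ++ R.map (fun j => (i, j)))) := by
    funext st i; simp [cdsBuild_inner]
  rw [hfun, cds_foldl_pair]

lemma pyRange_drop (a b : Int) (k : Nat) :
    (PySem.List.pyRange a b 1).drop k = PySem.List.pyRange (a + k) b 1 := by
  induction k generalizing a with
  | zero => simp
  | succ m ih =>
    by_cases hab : a < b
    · rw [PySem.List.pyRange_one_cons hab]
      simp only [List.drop_succ_cons]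
      rw [ih]; congr 1; push_cast; ring
    · rw [PySem.List.pyRange_one_eq_nil (by omega), PySem.List.pyRange_one_eq_nil (by omega)]
      simp

lemma pyRange_take (a b : Int) (k : Nat) :
    (PySem.List.pyRange a b 1).take k = PySem.List.pyRange a (min b (a + k)) 1 := by
  induction k generalizing a with
  | zero =>
    simp only [Nat.cast_zero, add_zero, List.take_zero]
    rw [PySem.List.pyRange_one_eq_nil (by omega)]
  | succ m ih =>
    by_cases hab : a < b
    · push_cast
      rw [PySem.List.pyRange_one_cons hab, List.take_succ_cons, ih,
        PySem.List.pyRange_one_cons (show a < min b (a + ((m : Int) + 1)) by omega)]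
      congr 2
      omega
    · rw [PySem.List.pyRange_one_eq_nil (by omega), PySem.List.pyRange_one_eq_nil (by push_cast; omega)]
      simp

lemma slice_pyRange (a b lx ux : Int) (h0 : 0 ≤ lx) (h1 : lx ≤ ux) (hub : ux ≤ b - a) :
    PySem.List.slice (PySem.List.pyRange a b 1) (some lx) (some ux)
      = PySem.List.pyRange (a + lx) (a + ux) 1 := by
  rw [PySem.List.slice_toNat _ h0 (le_trans h0 h1), pyRange_drop, pyRange_take]
  congr 1 <;> omega

lemma slice_map {α β : Type} (f : α → β) (xs : List α) (lx ux : Int) (h0 : 0 ≤ lx) (h1 : 0 ≤ ux) :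
    PySem.List.slice (xs.map f) (some lx) (some ux)
      = (PySem.List.slice xs (some lx) (some ux)).map f := by
  rw [PySem.List.slice_toNat _ h0 h1, PySem.List.slice_toNat _ h0 h1,
    List.map_take, List.map_drop]

lemma newset_eq (bs0 bs1 ops lx ly ux uy : Int)
    (hlx0 : 0 ≤ lx) (hlxu : lx ≤ ux) (hux : ux ≤ bs0)
    (hly0 : 0 ≤ ly) (hlyu : ly ≤ uy) (huy : uy ≤ bs1) :
    (PySem.List.slice ((PySem.List.pyRange ops (bs0 + ops) 1).map
        (fun i => (PySem.List.pyRange ops (bs1 + ops) 1).map (fun j => (i, j))))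
        (some lx) (some ux)).foldl
      (fun acc row => acc ++ PySem.List.slice row (some ly) (some uy)) []
    = (PySem.List.pyRange (ops + lx) (ops + ux) 1).flatMap
        (fun i => (PySem.List.pyRange (ops + ly) (ops + uy) 1).map (fun j => (i, j))) := by
  rw [slice_map _ _ _ _ hlx0 (le_trans hlx0 hlxu),
    slice_pyRange _ _ _ _ hlx0 hlxu (by omega),
    PySem.List.foldl_append_eq_flatMap]
  rw [List.flatMap_map]
  simp only [List.nil_append]
  congr 1
  funext i
  rw [slice_map _ _ _ _ hly0 (le_trans hly0 hlyu),
    slice_pyRange _ _ _ _ hly0 hlyu (by omega)]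

lemma loop_eq (bs0 bs1 ops bsx bsy : Int)
    (hx : bs0 - 1 ≤ 2 * bsx) (hy : bs1 - 1 ≤ 2 * bsy) (hops : 0 < ops) :
    ∀ (fuel : Nat) (lx ly ux uy : Int) (sets : List (List (Int × Int))),
      lx + ux = 2 * bsx → ly + uy = 2 * bsy → lx ≤ ux → ly ≤ uy →
      cdsLoopA bs0 bs1 ops ((PySem.List.pyRange ops (bs0 + ops) 1).map
          (fun i => (PySem.List.pyRange ops (bs1 + ops) 1).map (fun j => (i, j))))
        fuel lx ly ux uy sets
      = cdsLoopB bs0 bs1 ops fuel lx ly ux uy sets := by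
  intro fuel
  induction fuel with
  | zero => intro _ _ _ _ _ _ _ _ _; rfl
  | succ m ih =>
    intro lx ly ux uy sets hix hiy hlxu hlyu
    by_cases hc : ux < bs0 ∧ uy < bs1
    · rw [cdsLoopA, cdsLoopB, if_pos hc, if_pos hc,
        newset_eq bs0 bs1 ops lx ly ux uy (by omega) hlxu (by omega) (by omega) hlyu (by omega)]
      exact ih _ _ _ _ _ (by omega) (by omega) (by omega) (by omega)
    · rw [cdsLoopA, cdsLoopB, if_neg hc, if_neg hc]

-- ===== VERDICT (by name: the statement is the Claim_ definition above) =====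
theorem create_down_sets_spec : Claim_equal_create_down_sets := by
  intro block_size ops _ hpre
  unfold Spec_create_down_sets create_down_sets create_down_sets_alt
  rw [cdsBuild_eq]
  dsimp only
  by_cases hc : PySem.Int.truncdiv block_size.1 2 + ops < block_size.1 ∧
      PySem.Int.truncdiv block_size.2 2 + ops < block_size.2
  · have hops : 0 < ops := by
      rcases hpre with h | h
      · exact h
      · exact absurd hc h
    have hx := two_truncdiv_two block_size.1
    have hy := two_truncdiv_two block_size.2
    rw [loop_eq block_size.1 block_size.2 ops (PySem.Int.truncdiv block_size.1 2)
      (PySem.Int.truncdiv block_size.2 2) (by omega) (by omega) hops _ _ _ _ _ _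
      (by ring) (by ring) (by omega) (by omega)]
  · simp only [cdsLoopA, cdsLoopB, if_neg hc]
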